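-- pv_equiv track=rewrite | github.com/Draken1003/Projet-Python | python/essay exo 4 postfix.py | conv_postfixe
-- ===== SOURCE A (Python) =====
-- def conv_postfixe(chaine):
--     pileOp = []
--     pileConv = []
--     chaine.split() #ne sert a rien
--     for c in chaine:
--         if c == "(":
--             pileOp.append(c)
--         elif c in {"+","-" ,"*","/"}:
--             pileOp.append(c)
--         elif c == ")":
--             while pileOp !=  []:
--                 a = pileOp.pop()
--                 if a in {"+","-","*","/","**"}:
--                     pileConv.append(a)
--         else:
--             pileConv.append(c)
--     return pileOp , pileConv
-- ===== SOURCE B (Python) =====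
-- def conv_postfixe(chaine):
--     # Split-based reformulation: every ')' drains the whole stack, so the string
--     # decomposes into ')'-separated segments handled independently.
--     segments = chaine.split(")")
--     pileConv = []
--     for seg in segments[:-1]:
--         ops = [c for c in seg if c in "+-*/("]
--         pileConv.extend(c for c in seg if c not in "+-*/(")
--         pileConv.extend(op for op in reversed(ops) if op != "(")
--     last = segments[-1]
--     pileOp = [c for c in last if c in "+-*/("]
--     pileConv.extend(c for c in last if c not in "+-*/(")
--     return pileOp, pileConv
-- ===== Notes on version B (the rewrite author's own statement) =====
-- stated objective: alternative
-- what changed: B replaces A's character-by-character operator-stack simulation by splitting the input at closing parentheses and handling each segment independently with filter passes plus one reversed, paren-free operator list per drained segment, since each closing parenthesis empties the whole stack.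
import Mathlib
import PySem

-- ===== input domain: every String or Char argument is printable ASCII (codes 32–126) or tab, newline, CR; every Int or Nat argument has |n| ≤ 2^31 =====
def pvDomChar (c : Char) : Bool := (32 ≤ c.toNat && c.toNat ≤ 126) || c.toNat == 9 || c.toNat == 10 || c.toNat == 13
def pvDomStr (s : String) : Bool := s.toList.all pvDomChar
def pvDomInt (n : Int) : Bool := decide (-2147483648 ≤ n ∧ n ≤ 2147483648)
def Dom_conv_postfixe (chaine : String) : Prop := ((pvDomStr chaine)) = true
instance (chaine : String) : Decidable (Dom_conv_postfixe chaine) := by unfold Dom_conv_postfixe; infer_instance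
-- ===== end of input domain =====

-- B re-decomposes A's stack simulation into a split-at-closing-parenthesis per-segment computation
-- (an alternative of the same cost, proved to return the same pair on every string).

-- ===== PORT A =====
-- the while-loop draining pileOp: pops each element (stack held top-first), appends operators to pileConv
def drainA : List String → List String → List String
  | [], conv => conv
  | a :: rest, conv =>
      drainA rest (if a = "+" ∨ a = "-" ∨ a = "*" ∨ a = "/" ∨ a = "**" then conv ++ [a] else conv)

-- one iteration of A's for-loop; pileOp is kept top-first (push = cons), reversed on return to Python's list order
def stepA (st : List String × List String) (c : Char) : List String × List String :=
  if c = '(' then (c.toString :: st.1, st.2)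
  else if c = '+' ∨ c = '-' ∨ c = '*' ∨ c = '/' then (c.toString :: st.1, st.2)
  else if c = ')' then ([], drainA st.1 st.2)
  else (st.1, st.2 ++ [c.toString])

def conv_postfixe (chaine : String) : List String × List String :=
  let st := chaine.toList.foldl stepA ([], [])
  (st.1.reverse, st.2)

-- ===== PORT B =====
def opChars : List Char := ['+', '-', '*', '/', '(']

-- [c for c in seg if c in "+-*/("]
def segOps (seg : List Char) : List String := (seg.filter (· ∈ opChars)).map Char.toString

-- [c for c in seg if c not in "+-*/("]
def segOut (seg : List Char) : List String := (seg.filter (· ∉ opChars)).map Char.toString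

def conv_postfixe_alt (chaine : String) : List String × List String :=
  let segments := PySem.Chars.splitOn chaine.toList [')']
  let conv := segments.dropLast.foldl
    (fun conv seg => conv ++ segOut seg ++ ((segOps seg).reverse.filter (· ≠ "("))) []
  let last := segments.getLastD []
  (segOps last, conv ++ segOut last)

-- ===== PRECONDITION & SPEC =====
def Spec_conv_postfixe (chaine : String) (out : List String × List String) : Prop := out = conv_postfixe_alt chaine
instance (chaine : String) (out : List String × List String) : Decidable (Spec_conv_postfixe chaine out) := by unfold Spec_conv_postfixe; infer_instance

-- ===== CLAIM (what is proved, stated in full; the proofs are below) =====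
def Claim_equal_conv_postfixe : Prop := ∀ (chaine : String), Dom_conv_postfixe chaine → Spec_conv_postfixe chaine (conv_postfixe chaine)

-- ===== LEMMAS AND PROOFS =====

-- simple structural description of splitting on ')'
def mySplit : List Char → List (List Char)
  | [] => [[]]
  | c :: cs => if c = ')' then [] :: mySplit cs else (mySplit cs).modifyHead (c :: ·)

theorem mySplit_ne_nil (cs : List Char) : mySplit cs ≠ [] := by
  cases cs with
  | nil => simp [mySplit]
  | cons c cs =>
    simp only [mySplit]
    split
    · simp
    · cases h : mySplit cs with
      | nil => exact absurd h (mySplit_ne_nil cs)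
      | cons a l => simp [List.modifyHead]

theorem splitOn_go_spec (fuel : Nat) : ∀ (l cur : List Char) (acc : List (List Char)),
    l.length < fuel →
    PySem.Chars.splitOn.go [')'] fuel l cur acc
      = acc.reverse ++ (mySplit l).modifyHead (cur.reverse ++ ·) := by
  induction fuel with
  | zero => intro l cur acc h; omega
  | succ f ih =>
    intro l cur acc h
    cases l with
    | nil => simp [PySem.Chars.splitOn.go, mySplit]
    | cons c rest =>
      by_cases hc : c = ')'
      · subst hc
        rw [show PySem.Chars.splitOn.go [')'] (f+1) (')' :: rest) cur acc
              = PySem.Chars.splitOn.go [')'] f rest [] (cur.reverse :: acc) by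
            simp [PySem.Chars.splitOn.go, List.isPrefixOf]]
        rw [ih rest [] (cur.reverse :: acc) (by simpa using Nat.lt_of_succ_lt_succ h)]
        simp only [mySplit]
        cases mySplit rest <;> simp [List.modifyHead]
      · rw [show PySem.Chars.splitOn.go [')'] (f+1) (c :: rest) cur acc
              = PySem.Chars.splitOn.go [')'] f rest (c :: cur) acc by
            simp [PySem.Chars.splitOn.go, List.isPrefixOf, Ne.symm hc]]
        rw [ih rest (c :: cur) acc (by simpa using Nat.lt_of_succ_lt_succ h)]
        simp only [mySplit, if_neg hc]
        cases hms : mySplit rest with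
        | nil => exact absurd hms (mySplit_ne_nil rest)
        | cons a l => simp [List.modifyHead]

theorem splitOn_eq_mySplit (cs : List Char) : PySem.Chars.splitOn cs [')'] = mySplit cs := by
  rw [show PySem.Chars.splitOn cs [')'] = PySem.Chars.splitOn.go [')'] (cs.length + 1) cs [] [] from rfl]
  rw [splitOn_go_spec (cs.length + 1) cs [] [] (by omega)]
  cases hms : mySplit cs with
  | nil => exact absurd hms (mySplit_ne_nil cs)
  | cons a l => simp [List.modifyHead]

def invOps (ops : List String) : Prop :=
  ∀ a ∈ ops, a = "(" ∨ a = "+" ∨ a = "-" ∨ a = "*" ∨ a = "/"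

theorem drainA_eq_filter (ops : List String) (conv : List String) (h : invOps ops) :
    drainA ops conv = conv ++ ops.filter (· ≠ "(") := by
  induction ops generalizing conv with
  | nil => simp [drainA]
  | cons a rest ih =>
    have ha := h a (by simp)
    have hrest : invOps rest := fun b hb => h b (by simp [hb])
    rcases ha with h1 | h1 | h1 | h1 | h1 <;> subst h1 <;>
      simp [drainA, ih _ hrest, List.filter]

-- combined per-segment processing with an explicit carried stack
def F : List (List Char) → List String → List String → List String × List String
  | [], ops, conv => (ops, conv)
  | [seg], ops, conv => ((segOps seg).reverse ++ ops, conv ++ segOut seg)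
  | seg :: seg' :: rest, ops, conv =>
      F (seg' :: rest) [] (conv ++ segOut seg ++ (((segOps seg).reverse ++ ops).filter (· ≠ "(")))

theorem F_modifyHead (c : Char) (segs : List (List Char)) (hne : segs ≠ [])
    (ops conv : List String) :
    F (segs.modifyHead (c :: ·)) ops conv =
      if c ∈ opChars then F segs (c.toString :: ops) conv
      else F segs ops (conv ++ [c.toString]) := by
  by_cases hop : c ∈ opChars <;>
    cases segs with
    | nil => exact absurd rfl hne
    | cons seg rest =>
      cases rest <;> simp [F, segOps, segOut, List.filter_cons, hop, List.append_assoc]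

theorem foldl_stepA_eq_F (cs : List Char) : ∀ (ops conv : List String), invOps ops →
    cs.foldl stepA (ops, conv) = F (mySplit cs) ops conv := by
  induction cs with
  | nil => intro ops conv _; simp [mySplit, F, segOps, segOut]
  | cons c cs ih =>
    intro ops conv hinv
    by_cases hc : c = ')'
    · subst hc
      rw [List.foldl_cons, show stepA (ops, conv) ')' = ([], drainA ops conv) by simp [stepA],
        ih [] _ (fun a ha => absurd ha (by simp))]
      simp only [mySplit]
      cases hms : mySplit cs with
      | nil => exact absurd hms (mySplit_ne_nil cs)
      | cons a l => simp [F, segOps, segOut, drainA_eq_filter ops conv hinv]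
    · by_cases hop : c ∈ opChars
      · have hcs : c = '+' ∨ c = '-' ∨ c = '*' ∨ c = '/' ∨ c = '(' := by
          simpa [opChars] using hop
        have hstep : stepA (ops, conv) c = (c.toString :: ops, conv) := by
          rcases hcs with h | h | h | h | h <;> subst h <;> simp [stepA]
        have hinv' : invOps (c.toString :: ops) := by
          intro a ha
          rcases List.mem_cons.mp ha with h | h
          · subst h; rcases hcs with h | h | h | h | h <;> subst h <;> decide
          · exact hinv a h
        rw [List.foldl_cons, hstep, ih _ _ hinv']
        simp only [mySplit, if_neg hc]
        rw [F_modifyHead c _ (mySplit_ne_nil cs), if_pos hop]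
      · have hne : c ≠ '(' ∧ c ≠ '+' ∧ c ≠ '-' ∧ c ≠ '*' ∧ c ≠ '/' := by
          simp [opChars] at hop; tauto
        have hstep : stepA (ops, conv) c = (ops, conv ++ [c.toString]) := by
          obtain ⟨h1, h2, h3, h4, h5⟩ := hne
          simp [stepA, h1, h2, h3, h4, h5, hc]
        rw [List.foldl_cons, hstep, ih _ _ hinv]
        simp only [mySplit, if_neg hc]
        rw [F_modifyHead c _ (mySplit_ne_nil cs), if_neg hop]

theorem F_last (segs : List (List Char)) : ∀ (conv : List String), segs ≠ [] →
    F segs [] conv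
      = ((segOps (segs.getLastD [])).reverse,
         segs.dropLast.foldl
           (fun conv seg => conv ++ segOut seg ++ ((segOps seg).reverse.filter (· ≠ "("))) conv
           ++ segOut (segs.getLastD [])) := by
  induction segs with
  | nil => intro conv h; exact absurd rfl h
  | cons seg rest ih =>
    intro conv _
    cases rest with
    | nil => simp [F]
    | cons seg' rest' =>
      rw [show F (seg :: seg' :: rest') [] conv
            = F (seg' :: rest') []
                (conv ++ segOut seg ++ (((segOps seg).reverse ++ []).filter (· ≠ "("))) from rfl,
        ih _ (by simp)]
      simp

-- ===== VERDICT (by name: the statement is the Claim_ definition above) =====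
theorem conv_postfixe_spec : Claim_equal_conv_postfixe := by
  intro chaine _
  unfold Spec_conv_postfixe conv_postfixe conv_postfixe_alt
  rw [splitOn_eq_mySplit]
  rw [foldl_stepA_eq_F chaine.toList [] [] (by intro a h; simp at h)]
  rw [F_last _ _ (mySplit_ne_nil _)]
  simp
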